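-- pv_equiv track=rewrite | github.com/anand2312/advent-of-code | 2025/solutions/day_01_task_02.py | turn_left
-- ===== SOURCE A (Python) =====
-- def turn_left(current: int, n: int) -> tuple[int, int]:
--     count = 0
--     for _ in range(n):
--         current -= 1
--         if current == -1:
--             current = 99
--         if current == 0:
--             count += 1
--     return current, count
-- ===== SOURCE B (Python) =====
-- def turn_left(current: int, n: int) -> tuple[int, int]:
--     """Turn a countdown dial `n` steps: each step decrements the value, a step
--     that would reach -1 wraps to 99, and every step that lands on 0 is counted.
--     Computed in O(1): until the countdown reaches 0 the dial just decreases,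
--     and from then on it is periodic with period 100."""
--     steps = max(n, 0)
--     if current < 0 or steps < current:
--         # the countdown never completes, so the dial never wraps or lands on 0
--         return current - steps, 0
--     # zero is first landed on at step `current` (or step 100 when starting at 0),
--     # and then again every 100 steps
--     first = current if current > 0 else 100
--     zero_hits = (steps - first) // 100 + 1
--     return (current - steps) % 100, zero_hits
-- ===== Notes on version B (the rewrite author's own statement) =====
-- stated objective: faster
-- what changed: Replaced A's per-step simulation loop (decrement with wrap at -1, counting landings on 0) by an O(1) closed form: before the countdown completes the value just decreases, afterwards it is (current-n) % 100, and zero is landed on at step current (or 100 when starting at 0) and then every 100 steps, so the count is a floor division.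
import Mathlib
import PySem

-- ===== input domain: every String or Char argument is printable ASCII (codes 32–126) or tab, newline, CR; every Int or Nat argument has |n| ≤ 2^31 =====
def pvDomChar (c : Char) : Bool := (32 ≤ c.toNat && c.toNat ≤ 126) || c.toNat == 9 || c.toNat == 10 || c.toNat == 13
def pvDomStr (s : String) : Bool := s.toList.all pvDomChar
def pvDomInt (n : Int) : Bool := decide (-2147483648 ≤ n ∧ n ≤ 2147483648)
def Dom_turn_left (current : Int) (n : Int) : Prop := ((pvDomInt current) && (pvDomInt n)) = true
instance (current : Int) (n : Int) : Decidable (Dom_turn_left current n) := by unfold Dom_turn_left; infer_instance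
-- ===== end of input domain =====

-- B replaces A's O(n) simulation loop by an O(1) closed form (objective: faster, asymptotic).

-- ===== PORT A =====
-- A's loop body (current, count) -> updated (current, count), step for step
def pvStep (s : Int × Int) : Int × Int :=
  let c := s.1 - 1
  let c := if c = -1 then 99 else c
  let k := if c = 0 then s.2 + 1 else s.2
  (c, k)

def turn_left (current : Int) (n : Int) : Int × Int :=
  (PySem.List.pyRange 0 n 1).foldl (fun s _ => pvStep s) (current, 0)

-- ===== PORT B =====
def turn_left_alt (current : Int) (n : Int) : Int × Int :=
  let steps := max n 0
  if current < 0 ∨ steps < current then (current - steps, 0)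
  else
    let first := if current > 0 then current else 100
    let zero_hits := PySem.Int.floordiv (steps - first) 100 + 1
    (PySem.Int.mod (current - steps) 100, zero_hits)

-- ===== PRECONDITION & SPEC =====
def Spec_turn_left (current : Int) (n : Int) (out : Int × Int) : Prop := out = turn_left_alt current n
instance (current : Int) (n : Int) (out : Int × Int) : Decidable (Spec_turn_left current n out) := by unfold Spec_turn_left; infer_instance

-- ===== CLAIM =====
def Claim_equal_turn_left : Prop := ∀ (current : Int) (n : Int), Dom_turn_left current n → Spec_turn_left current n (turn_left current n)

-- ===== LEMMAS AND PROOFS =====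

-- closed form of the state after m iterations of pvStep from (c, 0)
def pvClosedC (c : Int) (m : Nat) : Int :=
  if c < 0 ∨ (m : Int) ≤ c then c - m else (c - m) % 100

def pvClosedK (c : Int) (m : Nat) : Int :=
  if c < 0 then 0
  else if c = 0 then (m : Int) / 100
  else if (m : Int) ≥ c then ((m : Int) - c) / 100 + 1
  else 0

lemma pvFoldl_const {α β : Type} (l : List α) (g : β → β) (init : β) :
    l.foldl (fun s _ => g s) init = g^[l.length] init := by
  induction l generalizing init with
  | nil => rfl
  | cons x xs ih => simp [List.foldl, ih, Function.iterate_succ_apply]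

lemma pvStep_closed (m : Nat) (c : Int) :
    pvStep^[m] (c, 0) = (pvClosedC c m, pvClosedK c m) := by
  induction m with
  | zero =>
      simp only [Function.iterate_zero, id_eq, pvClosedC, pvClosedK, Prod.mk.injEq,
        Nat.cast_zero]
      constructor <;> (split_ifs <;> omega)
  | succ m ih =>
      rw [Function.iterate_succ_apply', ih]
      simp only [pvStep, pvClosedC, pvClosedK, Prod.mk.injEq, Nat.cast_succ]
      constructor <;> (split_ifs <;> omega)

lemma pvA_eq_closed (current n : Int) :
    turn_left current n = (pvClosedC current n.toNat, pvClosedK current n.toNat) := by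
  unfold turn_left
  rw [pvFoldl_const, PySem.List.length_pyRange_one, ← pvStep_closed]
  norm_num

lemma pvB_eq_closed (current n : Int) :
    turn_left_alt current n = (pvClosedC current n.toNat, pvClosedK current n.toNat) := by
  unfold turn_left_alt pvClosedC pvClosedK
  have hs : max n 0 = (n.toNat : Int) := by omega
  have hm : ∀ a : Int, PySem.Int.mod a 100 = a % 100 := fun a =>
    PySem.Int.mod_eq_emod_of_pos (by norm_num)
  have hf : ∀ a : Int, PySem.Int.floordiv a 100 = a / 100 := fun a =>
    PySem.Int.floordiv_eq_ediv_of_pos (by norm_num)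
  simp only [hs, hm, hf]
  split_ifs <;> simp_all [Prod.mk.injEq] <;> omega
theorem turn_left_spec : Claim_equal_turn_left := by
  intro current n _
  unfold Spec_turn_left
  rw [pvA_eq_closed, pvB_eq_closed]
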